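-- pv_equiv track=rewrite | github.com/sk161717/Evogym-GASH | examples/utils/algo_utils.py | calc_curr_evaluation
-- ===== SOURCE A (Python) =====
-- def calc_curr_evaluation(gen,n_samples,batch_size):
--     curr_eval=0
--     for i in range(gen):
--         if i==0:
--             curr_eval+=n_samples
--         else:
--             curr_eval+=batch_size
--     return curr_eval
-- ===== SOURCE B (Python) =====
-- def calc_curr_evaluation(gen, n_samples, batch_size):
--     # closed form: first generation contributes n_samples, each later one batch_size
--     if gen <= 0:
--         return 0
--     return n_samples + (gen - 1) * batch_size
-- ===== Notes on version B (the rewrite author's own statement) =====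
-- stated objective: faster
-- what changed: Replaced the per-generation accumulation loop with the closed form n_samples + (gen-1)*batch_size (0 when gen <= 0).
import Mathlib
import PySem

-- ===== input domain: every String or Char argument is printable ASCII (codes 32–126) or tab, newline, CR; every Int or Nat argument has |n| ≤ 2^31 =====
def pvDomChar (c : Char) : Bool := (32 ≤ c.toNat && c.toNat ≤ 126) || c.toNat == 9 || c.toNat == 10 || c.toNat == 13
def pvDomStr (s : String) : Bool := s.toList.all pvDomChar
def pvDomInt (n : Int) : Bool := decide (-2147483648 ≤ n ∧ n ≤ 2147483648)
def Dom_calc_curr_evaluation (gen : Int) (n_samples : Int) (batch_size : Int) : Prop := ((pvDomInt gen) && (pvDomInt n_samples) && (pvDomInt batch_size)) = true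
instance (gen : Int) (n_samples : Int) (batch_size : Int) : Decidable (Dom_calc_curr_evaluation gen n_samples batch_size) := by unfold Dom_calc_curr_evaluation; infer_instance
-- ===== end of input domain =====

-- B replaces A's per-generation accumulation loop with the O(1) closed form
-- n_samples + (gen-1)*batch_size (0 when gen <= 0).

-- ===== PORT A =====
def calc_curr_evaluation (gen : Int) (n_samples : Int) (batch_size : Int) : Int :=
  (PySem.List.pyRange 0 gen 1).foldl
    (fun curr_eval i => if i = 0 then curr_eval + n_samples else curr_eval + batch_size) 0

-- ===== PORT B =====
def calc_curr_evaluation_alt (gen : Int) (n_samples : Int) (batch_size : Int) : Int :=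
  if gen ≤ 0 then 0 else n_samples + (gen - 1) * batch_size

-- ===== PRECONDITION & SPEC =====
def Spec_calc_curr_evaluation (gen : Int) (n_samples : Int) (batch_size : Int) (out : Int) : Prop := out = calc_curr_evaluation_alt gen n_samples batch_size
instance (gen : Int) (n_samples : Int) (batch_size : Int) (out : Int) : Decidable (Spec_calc_curr_evaluation gen n_samples batch_size out) := by unfold Spec_calc_curr_evaluation; infer_instance

-- ===== CLAIM (what is proved, stated in full; the proofs are below) =====
def Claim_equal_calc_curr_evaluation : Prop := ∀ (gen : Int) (n_samples : Int) (batch_size : Int), Dom_calc_curr_evaluation gen n_samples batch_size → Spec_calc_curr_evaluation gen n_samples batch_size (calc_curr_evaluation gen n_samples batch_size)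

-- ===== LEMMAS AND PROOFS =====

-- the tail of the loop (indices ≥ 1) adds batch_size once per index
theorem tail_foldl (g : Int) (hg : 1 ≤ g) (acc n bs : Int) :
    (PySem.List.pyRange 1 g 1).foldl
      (fun curr_eval i => if i = 0 then curr_eval + n else curr_eval + bs) acc
      = acc + (g - 1) * bs := by
  have hk : g = 1 + ((g - 1).toNat : Int) := by omega
  generalize hT : (g - 1).toNat = k at hk
  induction k generalizing g acc with
  | zero =>
    simp only [Nat.cast_zero, add_zero] at hk
    subst hk
    simp [PySem.List.pyRange_one_eq_nil (by omega : (1:Int) ≥ 1)]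
  | succ m ih =>
    have hg' : g = (1 + (m:Int)) + 1 := by push_cast at hk ⊢; omega
    rw [hg', PySem.List.pyRange_one_succ_right (by omega), List.foldl_append]
    rw [ih (1 + (m:Int)) (by omega) acc (by omega) rfl]
    have : (1 + (m:Int)) ≠ 0 := by omega
    simp only [List.foldl_cons, List.foldl_nil, if_neg this]
    ring

theorem calc_curr_eq (gen n_samples batch_size : Int) :
    calc_curr_evaluation gen n_samples batch_size = calc_curr_evaluation_alt gen n_samples batch_size := by
  unfold calc_curr_evaluation calc_curr_evaluation_alt
  by_cases h : gen ≤ 0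
  · rw [PySem.List.pyRange_one_eq_nil h]
    simp [h]
  · have h1 : (0:Int) < gen := by omega
    rw [PySem.List.pyRange_one_cons h1, List.foldl_cons]
    norm_num
    rw [tail_foldl gen (by omega) n_samples n_samples batch_size]
    simp [h]

-- ===== VERDICT (by name: the statement is the Claim_ definition above) =====
theorem calc_curr_evaluation_spec : Claim_equal_calc_curr_evaluation := by
  intro gen n bs _
  exact calc_curr_eq gen n bs
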